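-- pv_equiv track=rewrite | github.com/IdeaFlowCo/liveeditor.ai-tyi6pm | src/backend/core/templates/template_manager.py | validate_template
-- ===== SOURCE A (Python) =====
-- from typing import Dict, List, Optional, Tuple, Any, Union
--
-- class TemplateValidationError(Exception):
--     """
--     Exception raised when a template fails validation checks
--     """
--
--     def __init__(self, message: str):
--         """
--         Initialize the template validation error
--
--         Args:
--             message: Error message
--         """
--         super().__init__(message)
--         self.message = message
--
-- def validate_template(template_data: Dict, is_update: bool = False) -> bool:
--     """
--     Validates template data structure and content
--
--     Args:
--         template_data: Template data to validate
--         is_update: Whether this is an update operation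
--
--     Returns:
--         bool: True if template is valid
--
--     Raises:
--         TemplateValidationError: If validation fails
--     """
--     if not isinstance(template_data, dict):
--         raise TemplateValidationError("Template data must be a dictionary")
--
--     # For create operations, verify required fields
--     if not is_update:
--         required_fields = ['name', 'description', 'promptText', 'category']
--         for field in required_fields:
--             if field not in template_data or not template_data[field]:
--                 raise TemplateValidationError(f"Template '{field}' is required")
--
--     # For update operations, verify at least one valid field is provided
--     elif is_update and not any(f in template_data for f in ['name', 'description', 'promptText', 'category']):
--         raise TemplateValidationError("Update must include at least one of: name, description, promptText, category")
--
--     # Validate field types and values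
--     if 'name' in template_data:
--         if not isinstance(template_data['name'], str):
--             raise TemplateValidationError("Template name must be a string")
--         if len(template_data['name']) > 100:
--             raise TemplateValidationError("Template name must be 100 characters or less")
--
--     if 'description' in template_data:
--         if not isinstance(template_data['description'], str):
--             raise TemplateValidationError("Template description must be a string")
--         if len(template_data['description']) > 500:
--             raise TemplateValidationError("Template description must be 500 characters or less")
--
--     if 'promptText' in template_data:
--         if not isinstance(template_data['promptText'], str):
--             raise TemplateValidationError("Template promptText must be a string")
--         if len(template_data['promptText']) > 2000:
--             raise TemplateValidationError("Template promptText must be 2000 characters or less")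
--         if len(template_data['promptText']) < 10:
--             raise TemplateValidationError("Template promptText must be at least 10 characters")
--
--     if 'category' in template_data:
--         if not isinstance(template_data['category'], str):
--             raise TemplateValidationError("Template category must be a string")
--         if len(template_data['category']) > 50:
--             raise TemplateValidationError("Template category must be 50 characters or less")
--
--     return True
-- ===== SOURCE B (Python) =====
-- from typing import Dict
--
--
-- class TemplateValidationError(Exception):
--     def __init__(self, message: str):
--         super().__init__(message)
--         self.message = message
--
--
-- # (min_len, max_len) bounds per validated field, in A's field order
-- LIMITS = {
--     "name": (0, 100),
--     "description": (0, 500),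
--     "promptText": (10, 2000),
--     "category": (0, 50),
-- }
--
--
-- def validate_template(template_data: Dict, is_update: bool = False) -> bool:
--     if not isinstance(template_data, dict):
--         raise TemplateValidationError("Template data must be a dictionary")
--
--     if is_update:
--         if LIMITS.keys().isdisjoint(template_data.keys()):
--             raise TemplateValidationError(
--                 "Update must include at least one of: name, description, promptText, category")
--     else:
--         for field in LIMITS:
--             if not template_data.get(field):
--                 raise TemplateValidationError(f"Template '{field}' is required")
--
--     # Single pass over the INPUT's items (not over a rule list): unknown keys
--     # are skipped, known keys are range-checked against their (lo, hi) bounds.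
--     for key, value in template_data.items():
--         bounds = LIMITS.get(key)
--         if bounds is None:
--             continue
--         if not isinstance(value, str):
--             raise TemplateValidationError(f"Template {key} must be a string")
--         lo, hi = bounds
--         if len(value) > hi:
--             raise TemplateValidationError(
--                 f"Template {key} must be {hi} characters or less")
--         if len(value) < lo:
--             raise TemplateValidationError(
--                 f"Template {key} must be at least {lo} characters")
--     return True
-- ===== Notes on version B (the rewrite author's own statement) =====
-- stated objective: alternative
-- what changed: B validates by a single pass over the input dict's own items against a bounds table (skipping unknown keys, range-checking known ones), instead of A's four hard-coded per-field lookup blocks; the update check becomes a key-set disjointness test. Error messages on raising inputs differ in wording; those inputs are outside Pre_.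
import Mathlib
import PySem

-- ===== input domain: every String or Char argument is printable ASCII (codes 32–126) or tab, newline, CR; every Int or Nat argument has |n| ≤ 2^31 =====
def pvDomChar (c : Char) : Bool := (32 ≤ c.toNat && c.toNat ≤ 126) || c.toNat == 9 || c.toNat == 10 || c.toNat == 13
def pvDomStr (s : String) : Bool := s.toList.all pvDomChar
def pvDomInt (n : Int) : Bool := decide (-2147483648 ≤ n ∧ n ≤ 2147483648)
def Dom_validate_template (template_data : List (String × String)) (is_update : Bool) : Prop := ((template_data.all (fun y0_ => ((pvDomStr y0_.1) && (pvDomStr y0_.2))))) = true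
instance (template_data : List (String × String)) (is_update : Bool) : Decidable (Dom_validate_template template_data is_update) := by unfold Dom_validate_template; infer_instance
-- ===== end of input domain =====

-- B validates in one pass over the input dict's own items against a bounds table (unknown keys
-- skipped), instead of A's four hard-coded per-field blocks; no speed claim. Both raise
-- TemplateValidationError on the same inputs (messages differ in wording there); Pre_ excludes
-- exactly the raising inputs, where the ports encode 'raise' as `false`.

-- ===== PORT A =====
-- for-loop over required_fields: raise (false) on missing/empty, else continue
def vtReqA (td : List (String × String)) : List String → Bool
  | [] => true
  | f :: rest =>
    match (PySem.Dict.mk td).get? f with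
    | none => false
    | some v => if v = "" then false else vtReqA td rest

def validate_template (template_data : List (String × String)) (is_update : Bool) : Bool :=
  -- `isinstance(template_data, dict)` always holds under the type convention
  let pre : Bool :=
    if is_update = false then
      vtReqA template_data ["name", "description", "promptText", "category"]
    else
      (["name", "description", "promptText", "category"].any
        (fun f => ((PySem.Dict.mk template_data).get? f).isSome))
  pre &&
  -- if 'name' in template_data: (isinstance str always true) length check
  (match (PySem.Dict.mk template_data).get? "name" with
   | none => true
   | some v => decide (PySem.Str.len v ≤ 100)) &&
  (match (PySem.Dict.mk template_data).get? "description" with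
   | none => true
   | some v => decide (PySem.Str.len v ≤ 500)) &&
  (match (PySem.Dict.mk template_data).get? "promptText" with
   | none => true
   | some v => decide (PySem.Str.len v ≤ 2000) && decide (10 ≤ PySem.Str.len v)) &&
  (match (PySem.Dict.mk template_data).get? "category" with
   | none => true
   | some v => decide (PySem.Str.len v ≤ 50))

-- ===== PORT B =====
-- the LIMITS table of Source B: field ↦ (min_len, max_len)
def vtLimits : PySem.Dict String (Int × Int) :=
  PySem.Dict.mk [("name", (0, 100)), ("description", (0, 500)),
                 ("promptText", (10, 2000)), ("category", (0, 50))]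

-- Source B's per-item body: skip keys absent from LIMITS, range-check the rest
def vtCheckItem (k : String) (v : String) : Bool :=
  match vtLimits.get? k with
  | none => true
  | some (lo, hi) => decide (PySem.Str.len v ≤ hi) && decide (lo ≤ PySem.Str.len v)

def validate_template_alt (template_data : List (String × String)) (is_update : Bool) : Bool :=
  let d := PySem.Dict.mk template_data
  let pre : Bool :=
    if is_update then
      -- `LIMITS.keys().isdisjoint(template_data.keys())` raises; valid iff NOT disjoint
      vtLimits.keys.any (fun f => d.contains f)
    else
      -- `for field in LIMITS: if not template_data.get(field): raise`
      vtLimits.keys.all (fun f => d.getD f "" ≠ "")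
  pre &&
  -- `for key, value in template_data.items()`: the dict's items are its keys in
  -- first-occurrence order with first-match values — exact for the assoc-list dict
  -- representation (PySem.List.dedup = unique keys in order; value = d.get? key)
  (PySem.List.dedup (template_data.map Prod.fst)).all (fun k =>
    match d.get? k with
    | none => true
    | some v => vtCheckItem k v)

-- ===== PRECONDITION & SPEC =====
-- Pre_ admits exactly the inputs on which Python A RETURNS (True); on every other
-- well-typed input A raises TemplateValidationError, so nothing A returns on is excluded.
def Pre_validate_template (template_data : List (String × String)) (is_update : Bool) : Prop :=
  ((if is_update then
      ["name", "description", "promptText", "category"].any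
        (fun f => ((PySem.Dict.mk template_data).get? f).isSome)
    else
      ["name", "description", "promptText", "category"].all
        (fun f => ((PySem.Dict.mk template_data).getD f "") ≠ "")) &&
   ((PySem.Dict.mk template_data).get? "name").all (fun v => PySem.Str.len v ≤ 100) &&
   ((PySem.Dict.mk template_data).get? "description").all (fun v => PySem.Str.len v ≤ 500) &&
   ((PySem.Dict.mk template_data).get? "promptText").all
     (fun v => decide (PySem.Str.len v ≤ 2000) && decide (10 ≤ PySem.Str.len v)) &&
   ((PySem.Dict.mk template_data).get? "category").all (fun v => PySem.Str.len v ≤ 50)) = true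

instance (template_data : List (String × String)) (is_update : Bool) : Decidable (Pre_validate_template template_data is_update) := by unfold Pre_validate_template; infer_instance

def pvWitness_validate_template : (List (String × String)) × Bool :=
  ([("name", "n"), ("description", "d"), ("promptText", "0123456789"), ("category", "c")], false)

def Spec_validate_template (template_data : List (String × String)) (is_update : Bool) (out : Bool) : Prop := out = validate_template_alt template_data is_update
instance (template_data : List (String × String)) (is_update : Bool) (out : Bool) : Decidable (Spec_validate_template template_data is_update out) := by unfold Spec_validate_template; infer_instance

-- ===== CLAIM (what is proved, stated in full; the proofs are below) =====
def Claim_equal_validate_template : Prop := ∀ (template_data : List (String × String)) (is_update : Bool), Dom_validate_template template_data is_update → Pre_validate_template template_data is_update → Spec_validate_template template_data is_update (validate_template template_data is_update)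

-- ===== LEMMAS AND PROOFS =====

-- B's item pass, restricted to the four limited fields: if every limited field that is
-- present satisfies its bounds, every item of the dict passes vtCheckItem, and conversely.
theorem vt_items_all_iff (td : List (String × String)) :
    ((PySem.List.dedup (td.map Prod.fst)).all (fun k =>
      match (PySem.Dict.mk td).get? k with
      | none => true
      | some v => vtCheckItem k v)) = true ↔
    (∀ k v, (PySem.Dict.mk td).get? k = some v → vtCheckItem k v = true) := by
  rw [List.all_eq_true]
  constructor
  · intro h k v hget
    have hk : k ∈ (PySem.Dict.mk td).keys := by
      by_contra hnk
      rw [← PySem.Dict.get?_eq_none_iff_not_mem_keys] at hnk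
      simp [hnk] at hget
    have hk' : k ∈ PySem.List.dedup (td.map Prod.fst) := by
      rw [PySem.List.mem_dedup]
      simpa [PySem.Dict.keys_mk] using hk
    have := h k hk'
    simpa [hget] using this
  · intro h k _
    cases hget : (PySem.Dict.mk td).get? k with
    | none => simp
    | some v => exact h k v hget

-- A's four per-field length checks, bundled as the ∀-form used above
theorem vt_four_iff (td : List (String × String)) :
    (∀ k v, (PySem.Dict.mk td).get? k = some v → vtCheckItem k v = true) ↔
    (((PySem.Dict.mk td).get? "name").all (fun v => decide (PySem.Str.len v ≤ 100)) = true ∧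
     ((PySem.Dict.mk td).get? "description").all (fun v => decide (PySem.Str.len v ≤ 500)) = true ∧
     ((PySem.Dict.mk td).get? "promptText").all
       (fun v => decide (PySem.Str.len v ≤ 2000) && decide (10 ≤ PySem.Str.len v)) = true ∧
     ((PySem.Dict.mk td).get? "category").all (fun v => decide (PySem.Str.len v ≤ 50)) = true) := by
  constructor
  · intro h
    refine ⟨?_, ?_, ?_, ?_⟩ <;>
    · rw [Option.all_eq_true]  -- reduce to the some-case
      intro v hv
      have := h _ v hv
      simp [vtCheckItem, vtLimits, PySem.Dict.get?_mk_cons] at this ⊢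
      omega
  · rintro ⟨h1, h2, h3, h4⟩ k v hget
    rw [Option.all_eq_true] at h1 h2 h3 h4
    unfold vtCheckItem
    by_cases e1 : k = "name"
    · subst e1; have := h1 v hget; simp [vtLimits, PySem.Dict.get?_mk_cons] at this ⊢; omega
    by_cases e2 : k = "description"
    · subst e2; have := h2 v hget; simp [vtLimits, PySem.Dict.get?_mk_cons] at this ⊢; omega
    by_cases e3 : k = "promptText"
    · subst e3; have := h3 v hget; simp [vtLimits, PySem.Dict.get?_mk_cons] at *; omega
    by_cases e4 : k = "category"
    · subst e4; have := h4 v hget; simp [vtLimits, PySem.Dict.get?_mk_cons] at this ⊢; omega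
    · have : vtLimits.get? k = none := by
        rw [PySem.Dict.get?_eq_none_iff_not_mem_keys]
        simp [vtLimits, PySem.Dict.keys_mk]
        tauto
      simp [this]

-- the create-branch loops agree: A's early-exit recursion = B's `.get(f)` truthiness pass
theorem vt_req_eq (td : List (String × String)) :
    vtReqA td ["name", "description", "promptText", "category"] =
    (["name", "description", "promptText", "category"].all
      (fun f => ((PySem.Dict.mk td).getD f "") ≠ "")) := by
  cases hn : (PySem.Dict.mk td).get? "name" <;>
  cases hd : (PySem.Dict.mk td).get? "description" <;>
  cases hp : (PySem.Dict.mk td).get? "promptText" <;>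
  cases hc : (PySem.Dict.mk td).get? "category" <;>
    simp [vtReqA, hn, hd, hp, hc, PySem.Dict.getD_eq_get?_getD]

-- A = B on ALL inputs (both encode every raise as `false`); the proof does not need Pre_.
theorem vt_eq_all (td : List (String × String)) (u : Bool) :
    validate_template td u = validate_template_alt td u := by
  simp only [validate_template, validate_template_alt]
  have hpre :
      (if u = false then
        vtReqA td ["name", "description", "promptText", "category"]
      else
        (["name", "description", "promptText", "category"].any
          (fun f => ((PySem.Dict.mk td).get? f).isSome))) =
      (if u then
        vtLimits.keys.any (fun f => (PySem.Dict.mk td).contains f)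
      else
        vtLimits.keys.all (fun f => (PySem.Dict.mk td).getD f "" ≠ "")) := by
    cases u with
    | false => simpa [vtLimits, PySem.Dict.keys_mk] using vt_req_eq td
    | true =>
      simp [vtLimits, PySem.Dict.keys_mk, PySem.Dict.contains_eq_isSome_get?]
  rw [hpre]
  cases hp : (if u then
        vtLimits.keys.any (fun f => (PySem.Dict.mk td).contains f)
      else
        vtLimits.keys.all (fun f => (PySem.Dict.mk td).getD f "" ≠ "")) with
  | false => simp
  | true =>
    simp only [Bool.true_and]
    by_cases h4 :
      (((PySem.Dict.mk td).get? "name").all (fun v => decide (PySem.Str.len v ≤ 100)) = true ∧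
       ((PySem.Dict.mk td).get? "description").all (fun v => decide (PySem.Str.len v ≤ 500)) = true ∧
       ((PySem.Dict.mk td).get? "promptText").all
         (fun v => decide (PySem.Str.len v ≤ 2000) && decide (10 ≤ PySem.Str.len v)) = true ∧
       ((PySem.Dict.mk td).get? "category").all (fun v => decide (PySem.Str.len v ≤ 50)) = true)
    · have hb := (vt_items_all_iff td).mpr ((vt_four_iff td).mpr h4)
      obtain ⟨h1, h2, h3, h4'⟩ := h4
      rw [Option.all_eq_true] at h1 h2 h3 h4'
      rw [hb]
      cases hn : (PySem.Dict.mk td).get? "name" <;>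
      cases hd : (PySem.Dict.mk td).get? "description" <;>
      cases hpt : (PySem.Dict.mk td).get? "promptText" <;>
      cases hc : (PySem.Dict.mk td).get? "category" <;>
        simp_all
    · have hb : ((PySem.List.dedup (td.map Prod.fst)).all (fun k =>
          match (PySem.Dict.mk td).get? k with
          | none => true
          | some v => vtCheckItem k v)) ≠ true := by
        intro hc
        exact h4 ((vt_four_iff td).mp ((vt_items_all_iff td).mp hc))
      rw [Bool.eq_false_iff.mpr hb]
      cases hn : (PySem.Dict.mk td).get? "name" <;>
      cases hd : (PySem.Dict.mk td).get? "description" <;>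
      cases hpt : (PySem.Dict.mk td).get? "promptText" <;>
      cases hc : (PySem.Dict.mk td).get? "category" <;>
        simp_all

-- ===== VERDICT (by name: the statement is the Claim_ definition above) =====
theorem validate_template_spec : Claim_equal_validate_template := by
  intro td u _ _
  unfold Spec_validate_template
  exact vt_eq_all td u
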